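-- pv_equiv track=rewrite | github.com/arr0w-hs/graph_state_optimization | vertex_minor/generalised_rg.py | rm_double_lc
-- ===== SOURCE A (Python) =====
-- from itertools import zip_longest, combinations
--
-- def rm_double_lc(local_comp_list):
--     flag = 0
--     diff = 1
--     limit = 5*len(local_comp_list)
--     count = 0
--     while diff > 0 and count < limit:
--         res = []
--         count+=1
--         for i, j in (zip_longest(local_comp_list, local_comp_list[1:])):
--             if flag != 1:
--                 if i == j:
--                     flag = 1
--                     continue
--                 else:
--                     res.append(i)
--             else:
--                 flag = 0
--         diff = len(local_comp_list) - len(res)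
--         local_comp_list = res
--
--     return local_comp_list
-- ===== SOURCE B (Python) =====
-- def rm_double_lc(local_comp_list):
--     stack = []
--     for x in local_comp_list:
--         if stack and stack[-1] == x:
--             stack.pop()
--         else:
--             stack.append(x)
--     return stack
-- ===== Notes on version B (the rewrite author's own statement) =====
-- stated objective: simpler
-- what changed: Replaced the repeat-until-fixpoint pass loop (each pass rescans the list with a zip_longest/flag scheme removing adjacent equal pairs) with a single stack pass that pushes each element and pops when it equals the top.
import Mathlib
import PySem

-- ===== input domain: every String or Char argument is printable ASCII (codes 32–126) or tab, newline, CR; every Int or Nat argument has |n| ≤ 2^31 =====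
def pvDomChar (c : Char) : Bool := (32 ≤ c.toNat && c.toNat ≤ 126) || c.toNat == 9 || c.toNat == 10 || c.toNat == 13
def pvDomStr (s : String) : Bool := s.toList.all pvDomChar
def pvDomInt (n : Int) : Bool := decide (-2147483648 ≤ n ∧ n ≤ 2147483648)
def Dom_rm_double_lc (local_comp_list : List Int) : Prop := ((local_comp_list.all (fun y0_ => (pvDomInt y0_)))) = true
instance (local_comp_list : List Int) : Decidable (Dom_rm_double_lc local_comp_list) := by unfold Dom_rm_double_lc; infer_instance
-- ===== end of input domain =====

-- B replaces A's repeat-until-no-change rescan loop by one stack pass (push, pop on equal top); equivalence of the return values is proved below.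

-- ===== PORT A =====
-- zip_longest(l, l[1:]) : the second component is an Option (None fill value)
def pvZipL : List Int → List (Int × Option Int)
  | [] => []
  | [a] => [(a, none)]
  | a :: b :: t => (a, some b) :: pvZipL (b :: t)

-- body of A's for-loop: state = (res, flag)
def pvStepA (st : List Int × Bool) (ij : Int × Option Int) : List Int × Bool :=
  if st.2 ≠ true then
    if ij.2 = some ij.1 then (st.1, true)
    else (st.1 ++ [ij.1], false)
  else (st.1, false)

-- one execution of A's inner for-loop (flag starts and, as the code guarantees, ends at 0)
def pvPassA (l : List Int) : List Int :=
  ((pvZipL l).foldl pvStepA ([], false)).1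

-- A's while loop: fuel = limit - count, diff threaded as in the Python
def pvWhileA : Nat → Int → List Int → List Int
  | 0, _, l => l
  | n + 1, diff, l =>
    if 0 < diff then
      let res := pvPassA l
      pvWhileA n ((l.length : Int) - (res.length : Int)) res
    else l

def rm_double_lc (local_comp_list : List Int) : List Int :=
  pvWhileA (5 * local_comp_list.length) 1 local_comp_list

-- ===== PORT B =====
-- body of B's for-loop: `if stack and stack[-1] == x: stack.pop() else: stack.append(x)`
def pvStepB (st : List Int) (x : Int) : List Int :=
  if st.getLast? = some x then st.dropLast else st ++ [x]

def rm_double_lc_alt (local_comp_list : List Int) : List Int :=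
  local_comp_list.foldl pvStepB []

-- ===== PRECONDITION & SPEC =====
def Spec_rm_double_lc (local_comp_list : List Int) (out : List Int) : Prop := out = rm_double_lc_alt local_comp_list
instance (local_comp_list : List Int) (out : List Int) : Decidable (Spec_rm_double_lc local_comp_list out) := by unfold Spec_rm_double_lc; infer_instance

-- ===== CLAIM (what is proved, stated in full; the proofs are below) =====
def Claim_equal_rm_double_lc : Prop := ∀ (local_comp_list : List Int), Dom_rm_double_lc local_comp_list → Spec_rm_double_lc local_comp_list (rm_double_lc local_comp_list)

-- ===== LEMMAS AND PROOFS =====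

-- clean recursive characterisation of one pass of A
def passR : List Int → List Int
  | [] => []
  | [a] => [a]
  | a :: b :: t => if a = b then passR t else a :: passR (b :: t)

-- front-stack version of B's step (top of the stack at the head)
def sstep (st : List Int) (x : Int) : List Int :=
  match st with
  | [] => [x]
  | a :: t => if a = x then t else x :: a :: t

theorem stepB_eq (st : List Int) (x : Int) :
    pvStepB st x = (sstep st.reverse x).reverse := by
  rcases h : st.reverse with _ | ⟨a, t⟩
  · have : st = [] := by simpa using congrArg List.reverse h
    subst this; simp [pvStepB, sstep]
  · have hst : (a :: t).reverse = st := by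
      simpa using (congrArg List.reverse h).symm
    subst hst
    by_cases hax : a = x
    · simp [pvStepB, sstep, hax]
    · simp [pvStepB, sstep, hax]

theorem foldB_eq (l : List Int) : ∀ st : List Int,
    l.foldl pvStepB st.reverse = (l.foldl sstep st).reverse := by
  induction l with
  | nil => intro st; simp
  | cons x t ih =>
    intro st
    rw [List.foldl_cons, List.foldl_cons, stepB_eq, List.reverse_reverse]
    exact ih (sstep st x)

theorem alt_eq (l : List Int) : rm_double_lc_alt l = (l.foldl sstep []).reverse := by
  have := foldB_eq l []
  simpa [rm_double_lc_alt] using this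

-- passA = passR (generalising over the accumulated res), by strong induction on length
theorem passA_aux : ∀ n : Nat, ∀ l : List Int, l.length ≤ n → ∀ res : List Int,
    ((pvZipL l).foldl pvStepA (res, false)).1 = res ++ passR l := by
  intro n
  induction n with
  | zero =>
    intro l hl res
    have : l = [] := List.length_eq_zero_iff.mp (Nat.le_zero.mp hl)
    subst this; simp [pvZipL, passR]
  | succ n ih =>
    intro l hl res
    match l with
    | [] => simp [pvZipL, passR]
    | [a] => simp [pvZipL, passR, pvStepA]
    | a :: b :: t =>
      by_cases hab : a = b
      · subst hab
        simp only [pvZipL, List.foldl_cons]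
        have hstep : pvStepA (res, false) (a, some a) = (res, true) := by
          simp [pvStepA]
        rw [hstep]
        match t with
        | [] => simp [pvZipL, pvStepA, passR]
        | c :: t' =>
          simp only [pvZipL, List.foldl_cons]
          have hstep2 : pvStepA (res, true) (a, some c) = (res, false) := by
            simp [pvStepA]
          rw [hstep2]
          have hle : (c :: t').length ≤ n := by simp at hl ⊢; omega
          rw [ih (c :: t') hle res]
          simp [passR]
      · simp only [pvZipL, List.foldl_cons]
        have hstep : pvStepA (res, false) (a, some b) = (res ++ [a], false) := by
          simp [pvStepA]
          intro h; exact absurd h.symm hab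
        rw [hstep]
        have hle : (b :: t).length ≤ n := by simp at hl ⊢; omega
        rw [ih (b :: t) hle (res ++ [a])]
        simp [passR, hab]

theorem passA_eq (l : List Int) : pvPassA l = passR l := by
  have := passA_aux l.length l le_rfl []
  simpa [pvPassA] using this

-- length facts about passR
theorem passR_len : ∀ l : List Int, (passR l).length ≤ l.length := by
  intro l
  induction l using passR.induct with
  | case1 => simp [passR]
  | case2 a => simp [passR]
  | case3 b t ih => simp [passR]; omega
  | case4 a b t hab ih => simp [passR, hab]; simpa using ih

theorem passR_shrinks : ∀ l : List Int, passR l = l ∨ (passR l).length + 2 ≤ l.length := by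
  intro l
  induction l using passR.induct with
  | case1 => left; simp [passR]
  | case2 a => left; simp [passR]
  | case3 b t ih =>
    right; have := passR_len t; simp [passR]; omega
  | case4 a b t hab ih =>
    rcases ih with h | h
    · left; simp [passR, hab, h]
    · right; simp [passR, hab] at *; omega

-- a fixed point of passR has no adjacent equal elements
theorem passR_fix_chain : ∀ l : List Int, passR l = l → l.IsChain (· ≠ ·) := by
  intro l
  induction l using passR.induct with
  | case1 => intro _; simp
  | case2 a => intro _; simp
  | case3 b t ih =>
    intro h
    exfalso
    have hlen := congrArg List.length h
    have := passR_len t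
    simp [passR] at hlen
    omega
  | case4 a b t hab ih =>
    intro h
    simp [passR, hab] at h
    refine List.isChain_cons.mpr ⟨?_, ih h⟩
    intro y hy
    simp at hy
    subst hy
    exact hab

-- sstep preserves the no-adjacent-equal invariant of the stack
theorem sstep_chain {st : List Int} (h : st.IsChain (· ≠ ·)) (x : Int) :
    (sstep st x).IsChain (· ≠ ·) := by
  match st with
  | [] => simp [sstep]
  | a :: t =>
    by_cases hax : a = x
    · simpa [sstep, hax] using (List.isChain_cons.mp h).2
    · simp only [sstep, if_neg hax]
      refine List.isChain_cons.mpr ⟨?_, h⟩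
      intro y hy
      simp at hy
      subst hy
      exact fun hxa => hax hxa.symm

-- double application of sstep with the same element is the identity (on chain stacks)
theorem sstep_sstep {st : List Int} (h : st.IsChain (· ≠ ·)) (x : Int) :
    sstep (sstep st x) x = st := by
  match st with
  | [] => simp [sstep]
  | a :: t =>
    by_cases hax : a = x
    · subst hax
      match t with
      | [] => simp [sstep]
      | c :: t' =>
        have hac : a ≠ c := (List.isChain_cons.mp h).1 c (by simp)
        simp [sstep, Ne.symm hac]
    · simp [sstep, hax]

-- folding sstep over passR l gives the same stack as folding over l
theorem fold_passR : ∀ n : Nat, ∀ l : List Int, l.length ≤ n →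
    ∀ st : List Int, st.IsChain (· ≠ ·) →
    (passR l).foldl sstep st = l.foldl sstep st := by
  intro n
  induction n with
  | zero =>
    intro l hl st _
    rw [List.length_eq_zero_iff.mp (Nat.le_zero.mp hl)]; simp [passR]
  | succ n ih =>
    intro l hl st hst
    match l with
    | [] => simp [passR]
    | [a] => simp [passR]
    | a :: b :: t =>
      by_cases hab : a = b
      · subst hab
        simp only [passR, List.foldl_cons]
        rw [sstep_sstep hst]
        exact ih t (by simp at hl; omega) st hst
      · simp only [passR, if_neg hab, List.foldl_cons]
        exact ih (b :: t) (by simp at hl ⊢; omega) (sstep st a) (sstep_chain hst a)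

-- on a list with no adjacent equal elements the stack fold just reverses
theorem fold_chain : ∀ l : List Int, ∀ acc : List Int,
    (acc.reverse ++ l).IsChain (· ≠ ·) → l.foldl sstep acc = l.reverse ++ acc := by
  intro l
  induction l with
  | nil => intro acc _; simp
  | cons x t ih =>
    intro acc h
    have hstep : sstep acc x = x :: acc := by
      match acc with
      | [] => simp [sstep]
      | c :: t' =>
        have hcx : c ≠ x := by
          have := (List.isChain_append.mp h).2.2
          exact this c (by simp) x (by simp)
        simp [sstep, hcx]
    simp only [List.foldl_cons, hstep]
    have h' : ((x :: acc).reverse ++ t).IsChain (· ≠ ·) := by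
      simpa using h
    rw [ih (x :: acc) h']
    simp

-- when diff ≤ 0 the while loop returns its argument
theorem whileA_stop (n : Nat) (diff : Int) (l : List Int) (h : ¬ 0 < diff) :
    pvWhileA n diff l = l := by
  match n with
  | 0 => rfl
  | m + 1 => simp [pvWhileA, h]

-- main loop lemma: with enough fuel the while loop computes the stack reduction
theorem whileA_eq : ∀ n : Nat, ∀ l : List Int, ∀ diff : Int,
    l.length < 2 * n → 0 < diff →
    pvWhileA n diff l = (l.foldl sstep []).reverse := by
  intro n
  induction n with
  | zero => intro l diff hl _; omega
  | succ n ih =>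
    intro l diff hl hdiff
    simp only [pvWhileA, if_pos hdiff]
    rw [passA_eq]
    rcases passR_shrinks l with hfix | hshr
    · rw [hfix]
      rw [whileA_stop _ _ _ (by simp)]
      have hchain := passR_fix_chain l hfix
      have := fold_chain l [] (by simpa using hchain)
      rw [this]; simp
    · have hlen : (passR l).length < 2 * n := by omega
      have hd : (0 : Int) < (l.length : Int) - ((passR l).length : Int) := by omega
      rw [ih (passR l) _ hlen hd]
      rw [fold_passR l.length l le_rfl [] (by simp)]

-- ===== VERDICT (by name: the statement is the Claim_ definition above) =====
theorem rm_double_lc_spec : Claim_equal_rm_double_lc := by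
  intro l _
  unfold Spec_rm_double_lc
  rw [alt_eq]
  match l with
  | [] => rfl
  | a :: t =>
    apply whileA_eq
    · simp; omega
    · norm_num
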